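-- pv_equiv track=rewrite | github.com/NoamBaum1/NSI_Pascal | Projet_decodeur/rendu/entiers_en_machine.py | dec_vers_bin_signe
-- ===== SOURCE A (Python) =====
-- def dec_vers_bin_signe(n, b):
--     """
--     Convertit un entier décimal en représentation
--     binaire signée sur b bits.
--
--     Paramètres
--     ----------
--     n : int
--         Nombre décimal à convertir.
--     b : int
--         Nombre total de bits (dont 1 bit de signe).
--
--     Retour
--     ------
--     list[int]
--         Liste de b bits représentant le nombre
--         (bit de signe + valeur absolue).
--     """
--     # Déterminer le signe
--     signe = 0 if n >= 0 else 1
--     n = abs(n)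
--
--     # Conversion en binaire
--     bits = []
--     if n == 0:
--         bits = [0]
--     else:
--         while n > 0:
--             bits.insert(0, n % 2)
--             n //= 2
--
--     # Ajuster la longueur à b-1 bits (tronquer ou compléter à gauche)
--     bits = bits[-(b-1):]       # tronquer si trop long
--     while len(bits) < b - 1:   # compléter à gauche
--         bits.insert(0, 0)
--
--     return [signe] + bits
-- ===== SOURCE B (Python) =====
-- def dec_vers_bin_signe(n, b):
--     """Sign bit + magnitude via format/slice/zfill instead of manual division and insert loops."""
--     signe = 0 if n >= 0 else 1
--     s = format(abs(n), 'b')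
--     s = s[-(b - 1):]          # same truncation rule as A (s[-0:] is the whole string)
--     s = s.zfill(b - 1)        # left-pad with '0' up to b-1 (no-op for b-1 <= 0)
--     return [signe] + [int(c) for c in s]
-- ===== Notes on version B (the rewrite author's own statement) =====
-- stated objective: faster
-- what changed: Replaces the manual while-division loop building bits with insert(0,..) and the insert(0,..) padding loop by format(abs(n),'b') plus the same slice and a zfill, mapping characters to ints at the end.
import Mathlib
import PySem

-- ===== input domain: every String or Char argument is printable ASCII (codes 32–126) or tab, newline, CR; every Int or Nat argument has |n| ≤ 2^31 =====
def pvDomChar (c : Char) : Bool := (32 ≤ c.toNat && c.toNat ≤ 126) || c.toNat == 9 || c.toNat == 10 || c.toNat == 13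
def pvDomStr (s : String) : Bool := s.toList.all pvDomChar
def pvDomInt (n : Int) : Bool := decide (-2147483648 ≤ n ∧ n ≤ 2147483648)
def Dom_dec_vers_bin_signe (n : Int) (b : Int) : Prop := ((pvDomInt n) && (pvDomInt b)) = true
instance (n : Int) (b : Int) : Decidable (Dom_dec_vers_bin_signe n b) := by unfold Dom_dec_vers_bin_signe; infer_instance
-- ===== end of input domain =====

-- B replaces A's manual division/insert loops by format(abs(n),'b') + slice + zfill (idiomatic; same values everywhere).

-- ===== PORT A =====
-- while n > 0: bits.insert(0, n % 2); n //= 2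
def pvBitsLoop (n : Int) (bits : List Int) : List Int :=
  if h : 0 < n then
    pvBitsLoop (PySem.Int.floordiv n 2) (PySem.Int.mod n 2 :: bits)
  else bits
termination_by n.toNat
decreasing_by
  have h2 : PySem.Int.floordiv n 2 = n / 2 := PySem.Int.floordiv_eq_ediv_of_pos (by omega)
  rw [h2]; omega

-- while len(bits) < b - 1: bits.insert(0, 0)
def pvPadLoop (bits : List Int) (k : Int) : List Int :=
  if h : (bits.length : Int) < k then pvPadLoop (0 :: bits) k else bits
termination_by (k - bits.length).toNat
decreasing_by simp; omega

def dec_vers_bin_signe (n : Int) (b : Int) : List Int :=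
  let signe : Int := if n ≥ 0 then 0 else 1
  let m : Int := |n|
  let bits : List Int := if m = 0 then [0] else pvBitsLoop m []
  let bits := PySem.List.slice bits (some (-(b - 1))) none   -- bits[-(b-1):]
  let bits := pvPadLoop bits (b - 1)
  signe :: bits

-- ===== PORT B =====
-- format(m, 'b') for m : Nat — binary digits, most significant first (hand port, exact for m ≥ 0)
def pvFmtBin (m : Nat) : List Char :=
  if m < 2 then [Char.ofNat (m + 48)] else pvFmtBin (m / 2) ++ [Char.ofNat (m % 2 + 48)]

-- s.zfill(w) — exact port for sign-free strings (format of a non-negative int has no sign)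
def pvZfill (cs : List Char) (w : Int) : List Char :=
  List.replicate (w.toNat - cs.length) '0' ++ cs

def dec_vers_bin_signe_alt (n : Int) (b : Int) : List Int :=
  let signe : Int := if n ≥ 0 then 0 else 1
  let s := pvFmtBin n.natAbs                                -- format(abs(n), 'b')
  let s := PySem.List.slice s (some (-(b - 1))) none        -- s[-(b-1):]
  let s := pvZfill s (b - 1)                                -- s.zfill(b-1)
  signe :: s.map (fun c => (c.toNat : Int) - 48)            -- [int(c) for c in s], exact on digit chars

-- ===== PRECONDITION & SPEC =====
def Spec_dec_vers_bin_signe (n : Int) (b : Int) (out : List Int) : Prop := out = dec_vers_bin_signe_alt n b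
instance (n : Int) (b : Int) (out : List Int) : Decidable (Spec_dec_vers_bin_signe n b out) := by unfold Spec_dec_vers_bin_signe; infer_instance

-- ===== CLAIM (what is proved, stated in full; the proofs are below) =====
def Claim_equal_dec_vers_bin_signe : Prop := ∀ (n : Int) (b : Int), Dom_dec_vers_bin_signe n b → Spec_dec_vers_bin_signe n b (dec_vers_bin_signe n b)

-- ===== LEMMAS AND PROOFS =====

-- A's division loop produces exactly the digit values of B's binary string
lemma pvFmtBin_map (m : Nat) (hm : 0 < m) (acc : List Int) :
    pvBitsLoop (m : Int) acc = (pvFmtBin m).map (fun c => (c.toNat : Int) - 48) ++ acc := by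
  induction m using Nat.strong_induction_on generalizing acc with
  | _ m ih =>
    rw [pvBitsLoop]
    have hpos : (0 : Int) < (m : Int) := by exact_mod_cast hm
    rw [dif_pos hpos]
    have hfd : PySem.Int.floordiv (m : Int) 2 = ((m / 2 : Nat) : Int) := by simp
    have hmd : PySem.Int.mod (m : Int) 2 = ((m % 2 : Nat) : Int) := by simp
    rw [hfd, hmd]
    by_cases h2 : m < 2
    · -- m = 1
      interval_cases m
      norm_num
      rw [pvBitsLoop, dif_neg (by norm_num)]
      conv_rhs => rw [pvFmtBin]
      norm_num
      decide
    · -- m ≥ 2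
      have hdiv : 0 < m / 2 := Nat.div_pos (by omega) (by omega)
      rw [ih (m / 2) (by omega) hdiv]
      conv_rhs => rw [pvFmtBin, if_neg h2]
      rw [List.map_append, List.append_assoc]
      rcases Nat.mod_two_eq_zero_or_one m with hr | hr <;> simp [hr]

-- slicing commutes with the character-to-digit map
lemma pvSlice_map (cs : List Char) (a : Int) :
    PySem.List.slice (cs.map (fun c => (c.toNat : Int) - 48)) (some a) none
      = (PySem.List.slice cs (some a) none).map (fun c => (c.toNat : Int) - 48) := by
  simp [PySem.List.slice_some_none, List.map_drop]

-- A's padding loop is a left pad with zeros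
lemma pvPadLoop_eq (bits : List Int) (k : Int) :
    pvPadLoop bits k = List.replicate (k.toNat - bits.length) 0 ++ bits := by
  by_cases h : (bits.length : Int) < k
  · rw [pvPadLoop, dif_pos h, pvPadLoop_eq (0 :: bits) k]
    have h1 : k.toNat - bits.length = (k.toNat - (0 :: bits).length) + 1 := by
      simp only [List.length_cons]; omega
    rw [h1, List.replicate_succ']
    simp
  · rw [pvPadLoop, dif_neg h]
    have : k.toNat - bits.length = 0 := by omega
    simp [this]
termination_by (k - bits.length).toNat
decreasing_by simp; omega

-- mapping digits over zfill is left-padding the mapped digits with zeros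
lemma pvZfill_map (cs : List Char) (w : Int) :
    (pvZfill cs w).map (fun c => (c.toNat : Int) - 48)
      = List.replicate (w.toNat - cs.length) 0 ++ cs.map (fun c => (c.toNat : Int) - 48) := by
  simp [pvZfill]


-- ===== VERDICT (by name: the statement is the Claim_ definition above) =====
theorem dec_vers_bin_signe_spec : Claim_equal_dec_vers_bin_signe := by
  intro n b _
  unfold Spec_dec_vers_bin_signe dec_vers_bin_signe dec_vers_bin_signe_alt
  have habs : |n| = ((n.natAbs : Nat) : Int) := Int.abs_eq_natAbs n
  have hbits : (if |n| = 0 then [(0 : Int)] else pvBitsLoop |n| [])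
      = (pvFmtBin n.natAbs).map (fun c => (c.toNat : Int) - 48) := by
    by_cases h0 : n.natAbs = 0
    · rw [habs, h0]
      norm_num
      conv_rhs => rw [pvFmtBin]
      norm_num
      decide
    · rw [habs, if_neg (by exact_mod_cast h0),
        pvFmtBin_map n.natAbs (Nat.pos_of_ne_zero h0) [], List.append_nil]
  simp only [hbits, pvSlice_map, pvZfill_map, pvPadLoop_eq, List.length_map]
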